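-- pv_equiv track=rewrite | github.com/thiagopelizoni/HackerRank | euler029.py | count_prime_powers
-- ===== SOURCE A (Python) =====
-- def count_prime_powers(limit):
--     is_prime = [True] * (limit + 1)
--     total_count = 0
--
--     for number in range(2, limit + 1):
--         if is_prime[number]:
--             power = 2
--             non_prime_multiples = []
--
--             while number ** power <= limit:
--                 is_prime[number ** power] = False
--                 non_prime_multiples += [n for n in range(2 * power, limit * power + 1, power) if n > limit]
--                 power += 1
--
--             total_count += len(set(non_prime_multiples)) + (limit - 1)
--
--     return total_count
-- ===== SOURCE B (Python) =====
-- def count_prime_powers(limit):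
--     # Compute each distinct-multiple union size once per exponent depth (one
--     # growing set), instead of rebuilding and deduplicating per-base lists.
--     kmax = 1
--     v = 4
--     while v <= limit:
--         kmax += 1
--         v *= 2
--     f = [0, 0]          # f[k] = size of the union for depth k; f[0] unused
--     seen = set()
--     for p in range(2, kmax + 1):
--         for n in range(limit + p - limit % p, p * limit + 1, p):
--             seen.add(n)
--         f.append(len(seen))
--     powers = set()      # perfect powers b**e <= limit (e >= 2) seen so far
--     total = 0
--     for a in range(2, limit + 1):
--         if a in powers:
--             continue
--         k = 1
--         v = a * a
--         while v <= limit: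
--             powers.add(v)
--             v *= a
--             k += 1
--         total += f[k] + (limit - 1)
--     return total
-- ===== Notes on version B (the rewrite author's own statement) =====
-- stated objective: faster
-- what changed: A rebuilds and set-deduplicates huge lists of out-of-range multiples for every unmarked base and keeps a boolean sieve; B computes the distinct-multiple union size once per exponent depth k by growing a single set of multiples (f[k] table), tracks perfect powers in a set instead of a sieve array, and looks the per-base count up by depth.
import Mathlib
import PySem

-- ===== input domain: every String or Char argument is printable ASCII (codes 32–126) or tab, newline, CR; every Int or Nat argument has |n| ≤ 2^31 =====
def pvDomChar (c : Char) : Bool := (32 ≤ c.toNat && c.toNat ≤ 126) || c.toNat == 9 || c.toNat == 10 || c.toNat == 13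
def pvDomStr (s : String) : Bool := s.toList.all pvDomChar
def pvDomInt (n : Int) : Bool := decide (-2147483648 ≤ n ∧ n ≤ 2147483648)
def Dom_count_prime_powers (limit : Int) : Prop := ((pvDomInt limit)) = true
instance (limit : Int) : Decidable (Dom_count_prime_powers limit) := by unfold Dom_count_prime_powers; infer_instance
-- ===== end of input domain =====

-- B replaces A's per-base rebuild-and-deduplicate of the multiple lists by one growing set
-- computed once per exponent depth (objective: faster).

-- ===== PORT A =====
-- [n for n in range(2*power, limit*power+1, power) if n > limit]
def pvAFilter (limit power : Int) : List Int :=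
  (PySem.List.pyRange (2*power) (limit*power+1) power).filter (fun n => decide (limit < n))

-- the 'while number ** power <= limit' loop; fuel (limit+2).toNat only totalizes the
-- recursion (the condition fails before the fuel runs out, since number ≥ 2)
def pvAInner (limit number : Int) : Nat → Int → List Bool → List Int → List Bool × List Int
  | 0, _, sieve, mults => (sieve, mults)
  | fuel+1, power, sieve, mults =>
    if number ^ power.toNat ≤ limit then
      pvAInner limit number fuel (power+1)
        (sieve.set (number ^ power.toNat).toNat false)
        (mults ++ pvAFilter limit power)
    else (sieve, mults)

-- one iteration of 'for number in range(2, limit+1)'; len(set(non_prime_multiples)) is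
-- ported as the size of a hash set built from the list (Python's set is a hash set);
-- pv_hash_fold below proves this size equals the PySem.Set model's distinct count
def pvAStep (limit : Int) (st : List Bool × Int) (number : Int) : List Bool × Int :=
  if PySem.List.pyGetD st.1 number true = true then
    let r := pvAInner limit number (limit+2).toNat 2 st.1 []
    (r.1, st.2 + (((r.2.foldl (fun h x => h.insert x) (∅ : Std.HashSet Int)).size : Nat) : Int) + (limit - 1))
  else st

def count_prime_powers (limit : Int) : Int :=
  ((PySem.List.pyRange 2 (limit+1) 1).foldl (pvAStep limit)
    (List.replicate (limit+1).toNat true, 0)).2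

-- ===== PORT B =====
-- the 'while v <= limit: kmax += 1; v *= 2' loop (fuel totalizes, as above)
def pvBKmax (limit : Int) : Nat → Int → Int → Int
  | 0, kmax, _ => kmax
  | fuel+1, kmax, v => if v ≤ limit then pvBKmax limit fuel (kmax+1) (v*2) else kmax

-- range(limit + p - limit % p, p*limit + 1, p)
def pvBMarks (limit p : Int) : List Int :=
  PySem.List.pyRange (limit + p - PySem.Int.mod limit p) (p*limit+1) p

-- one iteration of 'for p in range(2, kmax+1)': grow the 'seen' hash set (Python's set),
-- append len(seen) to f
def pvBFStep (limit : Int) (st : Std.HashSet Int × List Int) (p : Int) : Std.HashSet Int × List Int :=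
  let seen := (pvBMarks limit p).foldl (fun h x => h.insert x) st.1
  (seen, st.2 ++ [((seen.size : Nat) : Int)])

-- the 'while v <= limit: powers.add(v); v *= a; k += 1' loop (fuel totalizes, as above)
def pvBBase (limit a : Int) : Nat → Int → Int → Std.HashSet Int → Int × Std.HashSet Int
  | 0, k, _, powers => (k, powers)
  | fuel+1, k, v, powers =>
    if v ≤ limit then pvBBase limit a fuel (k+1) (v*a) (powers.insert v)
    else (k, powers)

-- one iteration of 'for a in range(2, limit+1)'
def pvBStep (limit : Int) (f : List Int) (st : Std.HashSet Int × Int) (a : Int) : Std.HashSet Int × Int :=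
  if st.1.contains a then st
  else
    let r := pvBBase limit a (limit+2).toNat 1 (a*a) st.1
    (r.2, st.2 + PySem.List.pyGetD f r.1 0 + (limit - 1))

def count_prime_powers_alt (limit : Int) : Int :=
  let kmax := pvBKmax limit (limit+2).toNat 1 4
  let ff := (PySem.List.pyRange 2 (kmax+1) 1).foldl (pvBFStep limit) ((∅ : Std.HashSet Int), [0, 0])
  ((PySem.List.pyRange 2 (limit+1) 1).foldl (pvBStep limit ff.2) ((∅ : Std.HashSet Int), 0)).2

-- ===== PRECONDITION & SPEC =====
def Spec_count_prime_powers (limit : Int) (out : Int) : Prop := out = count_prime_powers_alt limit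
instance (limit : Int) (out : Int) : Decidable (Spec_count_prime_powers limit out) := by unfold Spec_count_prime_powers; infer_instance

-- ===== CLAIM (what is proved, stated in full; the proofs are below) =====
def Claim_equal_count_prime_powers : Prop := ∀ (limit : Int), Dom_count_prime_powers limit → Spec_count_prime_powers limit (count_prime_powers limit)

-- ===== LEMMAS AND PROOFS =====

-- the exponents p (from start p0) with a ** p <= limit, in order, as A's/B's inner loops visit them
def pvExps (limit a : Int) : Nat → Int → List Int
  | 0, _ => []
  | fuel+1, p => if a ^ p.toNat ≤ limit then p :: pvExps limit a fuel (p+1) else []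

-- the union set B grows: all multiples of some p ∈ [2,k] lying in (limit, p*limit]
def pvUnion (limit k : Int) : PySem.Set Int :=
  (PySem.List.pyRange 2 (k+1) 1).foldl (fun s p => (pvBMarks limit p).foldl PySem.Set.add s) PySem.Set.empty

-- A's boolean sieve is the pointwise complement of B's powers set on [0, limit]
def pvInv (limit : Int) (sieve : List Bool) (powers : Std.HashSet Int) : Prop :=
  sieve.length = (limit+1).toNat ∧
  ∀ n : Int, 0 ≤ n → n ≤ limit → PySem.List.pyGetD sieve n true = !(powers.contains n)

lemma pv_nat_two_mul_le_pow (m : Nat) (h : 2 ≤ m) : 2*m ≤ 2^m := by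
  induction m with
  | zero => omega
  | succ n ih =>
    by_cases hn : 2 ≤ n
    · have h1 := ih hn
      have h2 : 2 ^ n + 2 ^ n = 2 ^ (n+1) := by ring
      omega
    · interval_cases n <;> norm_num

lemma pv_two_mul_le_pow (p : Int) (hp : 2 ≤ p) : 2*p ≤ (2:Int) ^ p.toNat := by
  have h := pv_nat_two_mul_le_pow p.toNat (by omega)
  have h2 : ((2*p.toNat : Nat) : Int) ≤ ((2^p.toNat : Nat) : Int) := by exact_mod_cast h
  push_cast at h2
  rw [Int.toNat_of_nonneg (by omega : (0:Int) ≤ p)] at h2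
  exact h2

lemma pv_lt_pow (a q : Int) (ha : 2 ≤ a) (hq : 0 ≤ q) : q < a ^ q.toNat := by
  have h1 : q.toNat < 2 ^ q.toNat := Nat.lt_two_pow_self
  have h2 : ((q.toNat : Nat) : Int) < ((2 ^ q.toNat : Nat) : Int) := by exact_mod_cast h1
  push_cast at h2
  rw [Int.toNat_of_nonneg hq] at h2
  have h3 : (2:Int) ^ q.toNat ≤ a ^ q.toNat := pow_le_pow_left₀ (by norm_num) ha q.toNat
  omega

lemma pv_exps_mem (limit a : Int) (ha : 2 ≤ a) :
    ∀ (fuel : Nat) (p q : Int), 0 ≤ p → limit < p + (fuel : Int) →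
      (q ∈ pvExps limit a fuel p ↔ p ≤ q ∧ a ^ q.toNat ≤ limit) := by
  intro fuel
  induction fuel with
  | zero =>
    intro p q hp hlt
    simp only [pvExps, List.not_mem_nil, false_iff]
    rintro ⟨hpq, hpow⟩
    have := pv_lt_pow a q ha (by omega)
    simp only [Nat.cast_zero] at hlt
    omega
  | succ f ih =>
    intro p q hp hlt
    simp only [pvExps]
    split_ifs with hcond
    · simp only [List.mem_cons]
      rw [ih (p+1) q (by omega) (by push_cast at hlt ⊢; omega)]
      constructor
      · rintro (rfl | ⟨h1, h2⟩)
        · exact ⟨le_refl _, hcond⟩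
        · exact ⟨by omega, h2⟩
      · rintro ⟨h1, h2⟩
        rcases eq_or_lt_of_le h1 with rfl | h
        · exact Or.inl rfl
        · exact Or.inr ⟨by omega, h2⟩
    · simp only [List.not_mem_nil, false_iff]
      rintro ⟨h1, h2⟩
      have hmono : a ^ p.toNat ≤ a ^ q.toNat :=
        pow_le_pow_right₀ (by omega) (by omega)
      omega

lemma pv_exps_eq_range (limit a : Int) :
    ∀ (fuel : Nat) (p : Int),
      pvExps limit a fuel p
        = PySem.List.pyRange p (p + ((pvExps limit a fuel p).length : Int)) 1 := by
  intro fuel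
  induction fuel with
  | zero =>
    intro p
    simp [pvExps, PySem.List.pyRange_one_eq_nil (le_refl p)]
  | succ f ih =>
    intro p
    simp only [pvExps]
    split_ifs with h
    · set L := pvExps limit a f (p+1) with hL
      rw [List.length_cons, PySem.List.pyRange_one_cons (by push_cast; omega)]
      have h2 : p + ((L.length + 1 : Nat) : Int) = (p+1) + (L.length : Int) := by push_cast; ring
      rw [h2]
      have h3 := ih (p+1)
      rw [← hL] at h3
      exact congrArg (List.cons p) h3
    · simp [PySem.List.pyRange_one_eq_nil (le_refl p)]

lemma pv_aInner_eq (limit a : Int) :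
    ∀ (fuel : Nat) (p : Int) (sieve : List Bool) (mults : List Int),
      pvAInner limit a fuel p sieve mults =
        ((pvExps limit a fuel p).foldl (fun s q => s.set ((a ^ q.toNat).toNat) false) sieve,
         mults ++ (pvExps limit a fuel p).flatMap (pvAFilter limit)) := by
  intro fuel
  induction fuel with
  | zero => intro p sieve mults; simp [pvAInner, pvExps]
  | succ f ih =>
    intro p sieve mults
    simp only [pvAInner, pvExps]
    split_ifs with h
    · rw [ih]
      simp [List.flatMap_cons, List.append_assoc]
    · simp

lemma pv_bBase_eq (limit a : Int) :
    ∀ (fuel : Nat) (k : Int) (powers : Std.HashSet Int), 0 ≤ k →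
      pvBBase limit a fuel k (a ^ (k+1).toNat) powers =
        (k + ((pvExps limit a fuel (k+1)).length : Int),
         (pvExps limit a fuel (k+1)).foldl (fun s q => s.insert (a ^ q.toNat)) powers) := by
  intro fuel
  induction fuel with
  | zero => intro k powers hk; simp [pvBBase, pvExps]
  | succ f ih =>
    intro k powers hk
    simp only [pvBBase, pvExps]
    split_ifs with h
    · have hv : a ^ (k+1).toNat * a = a ^ (k+1+1).toNat := by
        have : (k+1+1).toNat = (k+1).toNat + 1 := by omega
        rw [this, pow_succ]
      rw [hv, ih (k+1) (powers.insert (a ^ (k+1).toNat)) (by omega)]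
      simp only [List.length_cons, List.foldl_cons, Prod.mk.injEq]
      exact ⟨by push_cast; omega, trivial⟩
    · simp

lemma pv_bKmax_eq (limit : Int) :
    ∀ (fuel : Nat) (k : Int), 0 ≤ k →
      pvBKmax limit fuel k ((2:Int) ^ (k+1).toNat)
        = k + ((pvExps limit 2 fuel (k+1)).length : Int) := by
  intro fuel
  induction fuel with
  | zero => intro k hk; simp [pvBKmax, pvExps]
  | succ f ih =>
    intro k hk
    simp only [pvBKmax, pvExps]
    split_ifs with h
    · have hv : (2:Int) ^ (k+1).toNat * 2 = 2 ^ (k+1+1).toNat := by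
        have : (k+1+1).toNat = (k+1).toNat + 1 := by omega
        rw [this, pow_succ]
      rw [hv, ih (k+1) (by omega)]
      simp only [List.length_cons]
      push_cast
      omega
    · simp

lemma pv_marks_mem (limit p n : Int) (hp : 2 ≤ p) :
    n ∈ pvBMarks limit p ↔ p ∣ n ∧ limit < n ∧ n ≤ p * limit := by
  unfold pvBMarks
  rw [PySem.List.mem_pyRange_iff_of_pos (by omega)]
  have hmod : PySem.Int.mod limit p = Int.fmod limit p := rfl
  have hr0 : 0 ≤ Int.fmod limit p := Int.fmod_nonneg_of_pos limit (by omega)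
  have hr1 : Int.fmod limit p < p := Int.fmod_lt_of_pos limit (by omega)
  have hds : p ∣ (limit + p - PySem.Int.mod limit p) := by
    rw [hmod]
    have h := (Int.fmod_add_mul_fdiv limit p)
    exact ⟨Int.fdiv limit p + 1, by linarith [h]⟩
  obtain ⟨e, he⟩ := hds
  constructor
  · rintro ⟨h1, h2, h3⟩
    obtain ⟨c, hc⟩ := h3
    have hdn : p ∣ n := ⟨e + c, by rw [mul_add, ← he]; omega⟩
    refine ⟨hdn, by omega, by omega⟩
  · rintro ⟨⟨c, hc⟩, h1, h2⟩
    refine ⟨?_, by omega, ⟨c - e, by rw [mul_sub, ← he]; omega⟩⟩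
    -- p*e ≤ p*c, since p*e ≤ limit + p and limit < p*c
    have h3 : p * e ≤ limit + p := by omega
    have h4 : limit < p * c := by omega
    have h5 : p * e < p * (c + 1) := by rw [mul_add]; omega
    have h6 : e < c + 1 := lt_of_mul_lt_mul_left h5 (by omega)
    have h7 : p * e ≤ p * c := by
      apply mul_le_mul_of_nonneg_left (by omega) (by omega)
    omega

lemma pv_fold_add_mem (l : List Int) (s : PySem.Set Int) (x : Int) :
    x ∈ l.foldl PySem.Set.add s ↔ x ∈ s ∨ x ∈ l := by
  induction l generalizing s with
  | nil => simp
  | cons y l ih =>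
    simp only [List.foldl_cons, List.mem_cons, ih, PySem.Set.mem_add]
    tauto

lemma pv_fold_add_nodup (l : List Int) (s : PySem.Set Int) (h : s.Nodup) :
    (l.foldl PySem.Set.add s).Nodup := by
  induction l generalizing s with
  | nil => exact h
  | cons y l ih => exact ih _ (PySem.Set.nodup_add s y h)

lemma pv_fold_marks_mem (limit : Int) (l : List Int) (s : PySem.Set Int) (x : Int) :
    x ∈ l.foldl (fun s p => (pvBMarks limit p).foldl PySem.Set.add s) s
      ↔ x ∈ s ∨ ∃ p ∈ l, x ∈ pvBMarks limit p := by
  induction l generalizing s with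
  | nil => simp
  | cons y l ih =>
    simp only [List.foldl_cons, ih, pv_fold_add_mem, List.mem_cons]
    constructor
    · rintro ((h | h) | ⟨p, hp, hm⟩)
      · exact Or.inl h
      · exact Or.inr ⟨y, Or.inl rfl, h⟩
      · exact Or.inr ⟨p, Or.inr hp, hm⟩
    · rintro (h | ⟨p, (rfl | hp), hm⟩)
      · exact Or.inl (Or.inl h)
      · exact Or.inl (Or.inr hm)
      · exact Or.inr ⟨p, hp, hm⟩

lemma pv_union_mem (limit k n : Int) :
    n ∈ pvUnion limit k ↔ ∃ p, 2 ≤ p ∧ p ≤ k ∧ p ∣ n ∧ limit < n ∧ n ≤ p * limit := by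
  unfold pvUnion
  rw [pv_fold_marks_mem]
  simp only [PySem.Set.empty, List.not_mem_nil, false_or]
  constructor
  · rintro ⟨p, hp, hm⟩
    rw [PySem.List.mem_pyRange_one] at hp
    rw [pv_marks_mem _ _ _ (by omega)] at hm
    exact ⟨p, by omega, by omega, hm.1, hm.2.1, hm.2.2⟩
  · rintro ⟨p, h2, hk, hd, hlt, hu⟩
    refine ⟨p, ?_, ?_⟩
    · rw [PySem.List.mem_pyRange_one]; omega
    · rw [pv_marks_mem _ _ _ h2]; exact ⟨hd, hlt, hu⟩

lemma pv_union_nodup (limit k : Int) : (pvUnion limit k).Nodup := by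
  unfold pvUnion
  have : ∀ (l : List Int) (s : PySem.Set Int), s.Nodup →
      (l.foldl (fun s p => (pvBMarks limit p).foldl PySem.Set.add s) s).Nodup := by
    intro l
    induction l with
    | nil => intro s hs; exact hs
    | cons y l ih => intro s hs; exact ih _ (pv_fold_add_nodup _ _ hs)
  exact this _ _ List.nodup_nil

lemma pv_nodup_len_eq (xs ys : List Int) (hx : xs.Nodup) (hy : ys.Nodup)
    (h : ∀ x, x ∈ xs ↔ x ∈ ys) : xs.length = ys.length := by
  have h1 := List.toFinset_card_of_nodup hx
  have h2 := List.toFinset_card_of_nodup hy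
  have h3 : xs.toFinset = ys.toFinset := by
    ext x
    simp only [List.mem_toFinset]
    exact h x
  rw [h3] at h1
  omega

lemma pv_hash_fold (l : List Int) (h : Std.HashSet Int) (s : PySem.Set Int)
    (hmem : ∀ x : Int, x ∈ h ↔ x ∈ s) (hsz : h.size = s.length) :
    (∀ x : Int, x ∈ l.foldl (fun h x => h.insert x) h ↔ x ∈ l.foldl PySem.Set.add s)
      ∧ (l.foldl (fun h x => h.insert x) h).size = (l.foldl PySem.Set.add s).length := by
  induction l generalizing h s with
  | nil => exact ⟨hmem, hsz⟩
  | cons y l ih =>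
    simp only [List.foldl_cons]
    apply ih
    · intro x
      rw [Std.HashSet.mem_insert, PySem.Set.mem_add, beq_iff_eq]
      constructor
      · rintro (rfl | hx)
        · exact Or.inr rfl
        · exact Or.inl ((hmem x).1 hx)
      · rintro (hx | rfl)
        · exact Or.inr ((hmem x).2 hx)
        · exact Or.inl rfl
    · rw [Std.HashSet.size_insert]
      have hadd : PySem.Set.add s y = if s.contains y then s else s ++ [y] := rfl
      by_cases hy : y ∈ s
      · rw [if_pos ((hmem y).2 hy), hadd, if_pos ((PySem.Set.contains_iff s y).2 hy)]
        exact hsz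
      · have hyh : ¬ y ∈ h := fun hc => hy ((hmem y).1 hc)
        rw [if_neg hyh, hadd]
        have : s.contains y = false := by
          cases hc : s.contains y with
          | false => rfl
          | true => exact absurd ((PySem.Set.contains_iff s y).1 hc) hy
        rw [this]
        simp [hsz]

lemma pv_hash_ofList (l : List Int) :
    (l.foldl (fun h x => h.insert x) (∅ : Std.HashSet Int)).size
      = (PySem.Set.ofList l).length := by
  have h := pv_hash_fold l (∅ : Std.HashSet Int) ([] : PySem.Set Int)
    (fun x => by simp [Std.HashSet.not_mem_empty]) (by simp)
  rw [h.2]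
  rfl

lemma pv_core_count (limit a : Int) (ha : 2 ≤ a) (hal : a ≤ limit) :
    ((PySem.Set.ofList ((pvExps limit a (limit+2).toNat 2).flatMap (pvAFilter limit))).length : Int)
      = ((pvUnion limit (1 + ((pvExps limit a (limit+2).toNat 2).length : Int))).length : Int) := by
  have hF : limit < 2 + (((limit+2).toNat : Nat) : Int) := by omega
  set E := pvExps limit a (limit+2).toNat 2 with hE
  have hmemE : ∀ q, q ∈ E ↔ 2 ≤ q ∧ a ^ q.toNat ≤ limit := by
    intro q
    rw [hE]
    have := pv_exps_mem limit a ha (limit+2).toNat 2 q (by omega) hF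
    constructor
    · intro h; have := this.1 h; exact ⟨by omega, this.2⟩
    · intro h; exact this.2 ⟨by omega, h.2⟩
  have hrange : ∀ q, q ∈ E ↔ 2 ≤ q ∧ q < 2 + (E.length : Int) := by
    intro q
    constructor
    · intro h
      have h2 := h
      rw [hE, pv_exps_eq_range, ← hE, PySem.List.mem_pyRange_one] at h2
      exact ⟨by omega, by omega⟩
    · intro h
      rw [hE, pv_exps_eq_range, ← hE, PySem.List.mem_pyRange_one]
      exact ⟨by omega, by omega⟩
  apply congrArg Nat.cast
  apply pv_nodup_len_eq _ _ (PySem.Set.nodup_ofList _) (pv_union_nodup _ _)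
  intro n
  rw [PySem.Set.mem_ofList, pv_union_mem]
  simp only [List.mem_flatMap]
  constructor
  · rintro ⟨p, hpE, hn⟩
    have h2p : 2 ≤ p := ((hmemE p).1 hpE).1
    unfold pvAFilter at hn
    simp only [List.mem_filter, decide_eq_true_eq] at hn
    obtain ⟨hr, hlt⟩ := hn
    rw [PySem.List.mem_pyRange_iff_of_pos (by omega)] at hr
    obtain ⟨h1, h2, h3⟩ := hr
    obtain ⟨c, hc⟩ := h3
    have hdn : p ∣ n := ⟨2 + c, by rw [mul_add]; omega⟩
    have hpk : p < 2 + (E.length : Int) := ((hrange p).1 hpE).2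
    refine ⟨p, h2p, by omega, hdn, hlt, ?_⟩
    have : n ≤ limit * p := by omega
    linarith [this, mul_comm limit p]
  · rintro ⟨p, h2p, hpk, hd, hlt, hub⟩
    have hpE : p ∈ E := (hrange p).2 ⟨h2p, by omega⟩
    have hpow : a ^ p.toNat ≤ limit := ((hmemE p).1 hpE).2
    have hb1 : 2*p ≤ (2:Int) ^ p.toNat := pv_two_mul_le_pow p h2p
    have hb2 : (2:Int) ^ p.toNat ≤ a ^ p.toNat := pow_le_pow_left₀ (by norm_num) ha p.toNat
    have h2ple : 2*p ≤ n := by omega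
    refine ⟨p, hpE, ?_⟩
    unfold pvAFilter
    simp only [List.mem_filter, decide_eq_true_eq]
    refine ⟨?_, hlt⟩
    rw [PySem.List.mem_pyRange_iff_of_pos (by omega)]
    refine ⟨h2ple, ?_, ?_⟩
    · have : p * limit = limit * p := mul_comm p limit
      omega
    · obtain ⟨c, hc⟩ := hd
      exact ⟨c - 2, by rw [mul_sub]; omega⟩

lemma pv_core_count_hash (limit a : Int) (ha : 2 ≤ a) (hal : a ≤ limit) :
    ((((pvExps limit a (limit+2).toNat 2).flatMap (pvAFilter limit)).foldl
        (fun h x => h.insert x) (∅ : Std.HashSet Int)).size : Int)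
      = ((pvUnion limit (1 + ((pvExps limit a (limit+2).toNat 2).length : Int))).length : Int) := by
  rw [pv_hash_ofList]
  exact pv_core_count limit a ha hal

lemma pv_union_step (limit j : Int) (hj : 2 ≤ j) :
    pvUnion limit j = (pvBMarks limit j).foldl PySem.Set.add (pvUnion limit (j-1)) := by
  unfold pvUnion
  have h1 : j - 1 + 1 = j := by omega
  rw [h1]
  have h2 : PySem.List.pyRange 2 (j+1) 1 = PySem.List.pyRange 2 j 1 ++ [j] := by
    have := PySem.List.pyRange_one_succ_right (by omega : (2:Int) ≤ j)
    exact this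
  rw [h2, List.foldl_append]
  simp

lemma pv_union_one (limit : Int) : pvUnion limit 1 = PySem.Set.empty := by
  unfold pvUnion
  rw [PySem.List.pyRange_one_eq_nil (by omega : (1:Int)+1 ≤ 2)]
  rfl

lemma pv_fFold_aux (limit : Int) :
    ∀ (n : Nat) (j m : Int), 2 ≤ j → j ≤ m + 1 → (m+1-j).toNat ≤ n →
      ∀ (hs : Std.HashSet Int) (f0 : List Int),
        (∀ x : Int, x ∈ hs ↔ x ∈ pvUnion limit (j-1)) →
        hs.size = (pvUnion limit (j-1)).length →
        ((PySem.List.pyRange j (m+1) 1).foldl (pvBFStep limit) (hs, f0)).2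
          = f0 ++ (PySem.List.pyRange j (m+1) 1).map (fun p => ((pvUnion limit p).length : Int)) := by
  intro n
  induction n with
  | zero =>
    intro j m hj hjm hn hs f0 hmem hsz
    have hje : j = m + 1 := by omega
    subst hje
    rw [PySem.List.pyRange_one_eq_nil (le_refl _)]
    simp
  | succ n ih =>
    intro j m hj hjm hn hs f0 hmem hsz
    rcases eq_or_lt_of_le hjm with hje | hjlt
    · subst hje
      rw [PySem.List.pyRange_one_eq_nil (le_refl _)]
      simp
    · rw [PySem.List.pyRange_one_cons hjlt]
      simp only [List.foldl_cons, List.map_cons]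
      have hbr := pv_hash_fold (pvBMarks limit j) hs (pvUnion limit (j-1)) hmem hsz
      have hstep : pvBFStep limit (hs, f0) j
          = ((pvBMarks limit j).foldl (fun h x => h.insert x) hs,
             f0 ++ [((pvUnion limit j).length : Int)]) := by
        unfold pvBFStep
        simp only
        congr 2
        rw [hbr.2, ← pv_union_step limit j hj]
      rw [hstep]
      have hu : pvUnion limit j = pvUnion limit (j+1-1) :=
        congrArg (pvUnion limit) (by omega : j = j + 1 - 1)
      have hmem' : ∀ x : Int, x ∈ (pvBMarks limit j).foldl (fun h x => h.insert x) hs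
          ↔ x ∈ pvUnion limit (j+1-1) := by
        intro x
        rw [hbr.1 x, ← pv_union_step limit j hj, ← hu]
      have hsz' : ((pvBMarks limit j).foldl (fun h x => h.insert x) hs).size
          = (pvUnion limit (j+1-1)).length := by
        rw [hbr.2, ← pv_union_step limit j hj, ← hu]
      rw [ih (j+1) m (by omega) (by omega) (by omega) _ _ hmem' hsz']
      simp

lemma pv_fFold_eq (limit m : Int) (hm : 1 ≤ m) :
    ((PySem.List.pyRange 2 (m+1) 1).foldl (pvBFStep limit) ((∅ : Std.HashSet Int), [0, 0])).2
      = [0, 0] ++ (PySem.List.pyRange 2 (m+1) 1).map (fun p => ((pvUnion limit p).length : Int)) := by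
  have h1 : pvUnion limit (2-1) = PySem.Set.empty := pv_union_one limit
  apply pv_fFold_aux limit (m+1-2).toNat 2 m (by omega) (by omega) (le_refl _)
  · intro x
    rw [h1]
    simp [Std.HashSet.not_mem_empty, PySem.Set.empty]
  · rw [h1]
    simp [PySem.Set.empty]

lemma pv_fLookup (limit m k : Int) (h1 : 1 ≤ k) (h2 : k ≤ m) :
    PySem.List.pyGetD
        ([0, 0] ++ (PySem.List.pyRange 2 (m+1) 1).map (fun p => ((pvUnion limit p).length : Int)))
        k 0
      = ((pvUnion limit k).length : Int) := by
  rw [PySem.List.pyGetD_of_nonneg _ _ (by omega)]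
  rcases eq_or_lt_of_le h1 with hk1 | hk2
  · have : k = 1 := by omega
    subst this
    rw [pv_union_one]
    simp [PySem.Set.empty, List.getD]
  · have h2k : 2 ≤ k := by omega
    have hlen2 : ([0, 0] : List Int).length = 2 := rfl
    rw [List.getD, List.getElem?_append_right (by simp; omega)]
    rw [List.getElem?_map]
    have hb : k.toNat - ([0,0] : List Int).length < (PySem.List.pyRange 2 (m+1) 1).length := by
      rw [PySem.List.length_pyRange_one]
      simp
      omega
    rw [List.getElem?_eq_getElem hb]
    rw [PySem.List.getElem_pyRange_one]
    have : (2:Int) + ((k.toNat - ([0,0] : List Int).length : Nat) : Int) = k := by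
      simp
      omega
    rw [this]
    simp

lemma pv_len_mono (limit a : Int) (ha : 2 ≤ a) (hl : 2 ≤ limit) :
    (pvExps limit a (limit+2).toNat 2).length ≤ (pvExps limit 2 (limit+2).toNat 2).length := by
  have hF : limit < 2 + (((limit+2).toNat : Nat) : Int) := by omega
  by_contra hcon
  rw [Nat.not_le] at hcon
  set E2 := pvExps limit 2 (limit+2).toNat 2 with hE2
  set Ea := pvExps limit a (limit+2).toNat 2 with hEa
  -- the element q := 2 + len E2 is in Ea but cannot be in E2
  set q : Int := 2 + (E2.length : Int) with hq
  have hqEa : q ∈ Ea := by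
    rw [hEa, pv_exps_eq_range, ← hEa, PySem.List.mem_pyRange_one]
    constructor
    · omega
    · have : (E2.length : Int) < (Ea.length : Int) := by exact_mod_cast hcon
      omega
  have hpow : a ^ q.toNat ≤ limit :=
    ((pv_exps_mem limit a ha (limit+2).toNat 2 q (by omega) hF).1 hqEa).2
  have hpow2 : (2:Int) ^ q.toNat ≤ a ^ q.toNat := pow_le_pow_left₀ (by norm_num) ha q.toNat
  have hqE2 : q ∈ E2 :=
    (pv_exps_mem limit 2 (by norm_num) (limit+2).toNat 2 q (by omega) hF).2 ⟨by omega, by omega⟩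
  have : q < 2 + (E2.length : Int) := by
    have h := hqE2
    rw [hE2, pv_exps_eq_range, ← hE2, PySem.List.mem_pyRange_one] at h
    exact h.2
  omega

lemma pv_inv_mark (limit m : Int) (sieve : List Bool) (powers : Std.HashSet Int)
    (h : pvInv limit sieve powers) (hm0 : 0 ≤ m) (hm1 : m ≤ limit) :
    pvInv limit (sieve.set m.toNat false) (powers.insert m) := by
  obtain ⟨hlen, hpt⟩ := h
  have hidx : m.toNat < sieve.length := by
    rw [hlen]; omega
  constructor
  · simpa using hlen
  · intro n hn0 hn1
    rw [PySem.List.pyGetD_of_nonneg _ _ hn0]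
    rw [Std.HashSet.contains_insert]
    by_cases hnm : n = m
    · subst hnm
      have hget : (sieve.set n.toNat false).getD n.toNat true = false := by
        rw [List.getD, List.getElem?_set_self hidx]
        rfl
      rw [hget, beq_self_eq_true]
      rfl
    · have hbeq : (m == n) = false := by
        rw [beq_eq_false_iff_ne]
        exact fun hc => hnm hc.symm
      have hget : (sieve.set m.toNat false).getD n.toNat true = sieve.getD n.toNat true := by
        rw [List.getD, List.getD, List.getElem?_set_ne (by omega)]
      rw [hget, hbeq, Bool.false_or]
      have := hpt n hn0 hn1
      rw [PySem.List.pyGetD_of_nonneg _ _ hn0] at this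
      exact this

lemma pv_inv_fold (limit a : Int) (ha : 2 ≤ a) (l : List Int)
    (hl : ∀ q ∈ l, 0 ≤ q ∧ a ^ q.toNat ≤ limit) :
    ∀ (sieve : List Bool) (powers : Std.HashSet Int), pvInv limit sieve powers →
      pvInv limit (l.foldl (fun s q => s.set ((a ^ q.toNat).toNat) false) sieve)
        (l.foldl (fun s q => s.insert (a ^ q.toNat)) powers) := by
  induction l with
  | nil => intro sieve powers h; exact h
  | cons q l ih =>
    intro sieve powers h
    simp only [List.foldl_cons]
    have hq := hl q (List.mem_cons_self)
    apply ih (fun x hx => hl x (List.mem_cons_of_mem _ hx))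
    apply pv_inv_mark limit (a ^ q.toNat) sieve powers h
    · positivity
    · exact hq.2

lemma pv_outer (limit : Int) (hl : 2 ≤ limit) (fL : List Int)
    (hf : ∀ k : Int, 1 ≤ k → k ≤ 1 + ((pvExps limit 2 (limit+2).toNat 2).length : Int) →
      PySem.List.pyGetD fL k 0 = ((pvUnion limit k).length : Int)) :
    ∀ (n : Nat) (a : Int), 2 ≤ a → (limit + 1 - a).toNat ≤ n →
      ∀ (sieve : List Bool) (powers : Std.HashSet Int) (total : Int),
        pvInv limit sieve powers →
        ((PySem.List.pyRange a (limit+1) 1).foldl (pvAStep limit) (sieve, total)).2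
          = ((PySem.List.pyRange a (limit+1) 1).foldl (pvBStep limit fL) (powers, total)).2 := by
  intro n
  induction n with
  | zero =>
    intro a ha hle sieve powers total hInv
    rw [PySem.List.pyRange_one_eq_nil (by omega)]
    rfl
  | succ n ih =>
    intro a ha hle sieve powers total hInv
    by_cases hend : limit + 1 ≤ a
    · rw [PySem.List.pyRange_one_eq_nil hend]
      rfl
    · push Not at hend
      rw [PySem.List.pyRange_one_cons (by omega)]
      simp only [List.foldl_cons]
      obtain ⟨hlen, hpt⟩ := hInv
      have hread : PySem.List.pyGetD sieve a true = !(powers.contains a) :=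
        hpt a (by omega) (by omega)
      cases hc : powers.contains a with
      | true =>
        have hA : pvAStep limit (sieve, total) a = (sieve, total) := by
          unfold pvAStep
          rw [hread, hc]
          simp
        have hB : pvBStep limit fL (powers, total) a = (powers, total) := by
          unfold pvBStep
          rw [hc]
          simp
        rw [hA, hB]
        exact ih (a+1) (by omega) (by omega) _ _ _ ⟨hlen, hpt⟩
      | false =>
        set E := pvExps limit a (limit+2).toNat 2 with hE
        have hmemE : ∀ q, q ∈ E ↔ 2 ≤ q ∧ a ^ q.toNat ≤ limit := by
          intro q
          rw [hE]
          have := pv_exps_mem limit a (by omega) (limit+2).toNat 2 q (by omega) (by omega)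
          constructor
          · intro h; have := this.1 h; exact ⟨by omega, this.2⟩
          · intro h; exact this.2 ⟨by omega, h.2⟩
        have hA : pvAStep limit (sieve, total) a
            = (E.foldl (fun s q => s.set ((a ^ q.toNat).toNat) false) sieve,
               total + (((E.flatMap (pvAFilter limit)).foldl (fun h x => h.insert x)
                  (∅ : Std.HashSet Int)).size : Int) + (limit-1)) := by
          unfold pvAStep
          rw [hread, hc]
          simp only [Bool.not_false, if_pos]
          rw [pv_aInner_eq]
          simp [hE]
        have hB : pvBStep limit fL (powers, total) a
            = (E.foldl (fun s q => s.insert (a ^ q.toNat)) powers,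
               total + ((pvUnion limit (1 + (E.length : Int))).length : Int) + (limit-1)) := by
          unfold pvBStep
          rw [hc]
          simp only [Bool.false_eq_true, if_false]
          have hv : a*a = a ^ ((1:Int)+1).toNat := by
            rw [show ((1:Int)+1).toNat = 2 by decide]
            exact (pow_two a).symm
          rw [hv, pv_bBase_eq limit a (limit+2).toNat 1 powers (by omega)]
          rw [show (1:Int)+1 = 2 by norm_num]
          simp only [← hE]
          have hlk : PySem.List.pyGetD fL (1 + (E.length : Int)) 0
              = ((pvUnion limit (1 + (E.length : Int))).length : Int) := by
            apply hf
            · omega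
            · have := pv_len_mono limit a (by omega) (by omega)
              rw [← hE] at this
              omega
          rw [hlk]
        rw [hA, hB]
        have hcnt := pv_core_count_hash limit a (by omega) (by omega)
        rw [← hE] at hcnt
        rw [hcnt]
        apply ih (a+1) (by omega) (by omega)
        apply pv_inv_fold limit a (by omega) E
        · intro q hq
          have := (hmemE q).1 hq
          exact ⟨by omega, this.2⟩
        · exact ⟨hlen, hpt⟩

lemma pv_inv_init (limit : Int) :
    pvInv limit (List.replicate (limit+1).toNat true) (∅ : Std.HashSet Int) := by
  constructor
  · simp
  · intro n hn0 hn1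
    rw [PySem.List.pyGetD_of_nonneg _ _ hn0]
    have h1 : (List.replicate (limit+1).toNat true).getD n.toNat true = true := by
      rw [List.getD, List.getElem?_replicate]
      split_ifs <;> rfl
    rw [h1]
    have : (∅ : Std.HashSet Int).contains n = false := by
      cases hc : (∅ : Std.HashSet Int).contains n with
      | false => rfl
      | true => exact absurd (Std.HashSet.mem_iff_contains.2 hc) (Std.HashSet.not_mem_empty)
    rw [this]
    rfl

-- ===== VERDICT (by name: the statement is the Claim_ definition above) =====
theorem count_prime_powers_spec : Claim_equal_count_prime_powers := by
  unfold Claim_equal_count_prime_powers Spec_count_prime_powers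
  intro limit _
  by_cases hl : limit < 2
  · unfold count_prime_powers count_prime_powers_alt
    rw [PySem.List.pyRange_one_eq_nil (by omega : limit + 1 ≤ 2)]
    rfl
  · rw [not_lt] at hl
    have hkm := pv_bKmax_eq limit (limit+2).toNat 1 (by omega)
    rw [show ((1:Int)+1).toNat = 2 by decide] at hkm
    rw [show ((2:Int)^(2:Nat)) = 4 by norm_num] at hkm
    rw [show (1:Int)+1 = 2 by norm_num] at hkm
    set L2 := (pvExps limit 2 (limit+2).toNat 2).length with hL2
    have e0 : count_prime_powers limit
        = ((PySem.List.pyRange 2 (limit+1) 1).foldl (pvAStep limit)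
            (List.replicate (limit+1).toNat true, 0)).2 := rfl
    have e1 : count_prime_powers_alt limit
        = ((PySem.List.pyRange 2 (limit+1) 1).foldl
            (pvBStep limit
              ((PySem.List.pyRange 2 ((pvBKmax limit (limit+2).toNat 1 4)+1) 1).foldl
                (pvBFStep limit) ((∅ : Std.HashSet Int), [0, 0])).2)
            ((∅ : Std.HashSet Int), 0)).2 := rfl
    rw [e0, e1, hkm, pv_fFold_eq limit (1 + (L2:Int)) (by omega)]
    exact pv_outer limit hl _
      (fun k h1 h2 => pv_fLookup limit (1 + (L2:Int)) k h1 h2)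
      (limit + 1 - 2).toNat 2 (by omega) (le_refl _)
      _ _ 0 (pv_inv_init limit)
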